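-- pv_equiv track=rewrite | github.com/mskozlova/advent_of_code | 2023/day14/day14_pt2.py | move_column_south
-- ===== SOURCE A (Python) =====
-- def move_column_south(map, column_num):
--     new_column = []
--     total_rows = len(map)
--     last_occupied_row = total_rows
--     load = 0
--
--     for row_num in range(total_rows - 1, -1, -1):
--         symbol = map[row_num][column_num]
--
--         if symbol == ".":
--             pass
--         elif symbol == "O":
--             last_occupied_row -= 1
--             load += total_rows - last_occupied_row
--             new_column.append("O")
--         else:  # symbol == "#"
--             while len(new_column) < total_rows - row_num - 1:
--                 new_column.append(".")
--
--             new_column.append("#")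
--             last_occupied_row = row_num
--
--     while len(new_column) < total_rows:
--         new_column.append(".")
--
--     new_column = new_column[::-1]
--
--     for row_num in range(total_rows):
--         map[row_num][column_num] = new_column[row_num]
--
--     return load
-- ===== SOURCE B (Python) =====
-- def move_column_south(map, column_num):
--     # Forward segment scan: between walls, count the O's, settle them at the
--     # segment bottom, add their load in closed form. Mutates map like A does
--     # (any non '.'/'O' symbol is rewritten as a literal '#').
--     total_rows = len(map)
--     load = 0
--     seg_start = 0
--     count = 0
--     for row in range(total_rows):
--         symbol = map[row][column_num]
--         if symbol == "O":
--             count += 1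
--         elif symbol != ".":
--             load += count * (total_rows - row) + count * (count + 1) // 2
--             for r in range(seg_start, row - count):
--                 map[r][column_num] = "."
--             for r in range(row - count, row):
--                 map[r][column_num] = "O"
--             map[row][column_num] = "#"
--             seg_start = row + 1
--             count = 0
--     load += count * (count + 1) // 2
--     for r in range(seg_start, total_rows - count):
--         map[r][column_num] = "."
--     for r in range(total_rows - count, total_rows):
--         map[r][column_num] = "O"
--     return load
-- ===== Notes on version B (the rewrite author's own statement) =====
-- stated objective: alternative
-- what changed: Replaces A's bottom-up build of a reversed new column with a last_occupied_row pointer by a single top-down scan over wall-bounded segments that counts each segment's O's and adds their load with a closed-form k*(N-e)+k*(k+1)//2 per segment.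
import Mathlib
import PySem

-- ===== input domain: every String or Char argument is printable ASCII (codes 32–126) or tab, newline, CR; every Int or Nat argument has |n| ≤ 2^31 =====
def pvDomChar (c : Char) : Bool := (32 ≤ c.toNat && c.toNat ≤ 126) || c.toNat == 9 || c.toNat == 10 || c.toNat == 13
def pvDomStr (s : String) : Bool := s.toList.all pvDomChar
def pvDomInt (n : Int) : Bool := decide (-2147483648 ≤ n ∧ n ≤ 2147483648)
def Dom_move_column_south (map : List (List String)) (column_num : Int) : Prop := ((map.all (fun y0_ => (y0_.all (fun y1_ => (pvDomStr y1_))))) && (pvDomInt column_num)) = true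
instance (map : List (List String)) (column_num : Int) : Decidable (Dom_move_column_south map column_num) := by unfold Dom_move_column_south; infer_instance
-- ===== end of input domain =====

-- B replaces A's backward build-reverse-writeback with a forward segment scan and a
-- closed-form load per segment; both Pythons mutate `map` identically and the proved
-- equivalence is about the RETURN value (the ports omit the in-place writes, which the
-- returned load never reads).

-- ===== PORT A =====
-- A's loop over range(total_rows-1,-1,-1) with state (new_column, last_occupied_row, load);
-- the while-padding is the appended replicate; the trailing padding/reverse/write-back of
-- new_column does not affect the returned load, so the port returns the load component.
def move_column_south (map : List (List String)) (column_num : Int) : Int :=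
  let total_rows : Int := map.length
  let st := (PySem.List.pyRange (total_rows - 1) (-1) (-1)).foldl
    (fun (st : List String × Int × Int) row_num =>
      if PySem.List.pyGetD (PySem.List.pyGetD map row_num []) column_num "" = "." then st
      else if PySem.List.pyGetD (PySem.List.pyGetD map row_num []) column_num "" = "O" then
        (st.1 ++ ["O"], st.2.1 - 1, st.2.2 + (total_rows - (st.2.1 - 1)))
      else
        ((st.1 ++ List.replicate ((total_rows - row_num - 1).toNat - st.1.length) ".") ++ ["#"],
         row_num, st.2.2))
    ([], total_rows, 0)
  st.2.2

-- ===== PORT B =====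
-- Source B's forward scan with state (load, count); seg_start and the fill loops only perform
-- the in-place writes, which the returned load never reads, so the port omits them.
def move_column_south_alt (map : List (List String)) (column_num : Int) : Int :=
  let total_rows : Int := map.length
  let st := (PySem.List.pyRange 0 total_rows 1).foldl
    (fun (st : Int × Int) row =>
      if PySem.List.pyGetD (PySem.List.pyGetD map row []) column_num "" = "O" then (st.1, st.2 + 1)
      else if PySem.List.pyGetD (PySem.List.pyGetD map row []) column_num "" = "." then st
      else (st.1 + st.2 * (total_rows - row) + PySem.Int.floordiv (st.2 * (st.2 + 1)) 2, 0))
    (0, 0)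
  st.1 + PySem.Int.floordiv (st.2 * (st.2 + 1)) 2

-- ===== PRECONDITION & SPEC =====
-- Pre_: A raises IndexError iff column_num is an invalid Python index for some row; A is total otherwise.
def Pre_move_column_south (map : List (List String)) (column_num : Int) : Prop :=
  ∀ row ∈ map, PySem.Raise.InRange row.length column_num
instance (map : List (List String)) (column_num : Int) : Decidable (Pre_move_column_south map column_num) := by unfold Pre_move_column_south; infer_instance
def pvWitness_move_column_south : List (List String) × Int := ([["O", "."], ["#", "O"]], 0)

def Spec_move_column_south (map : List (List String)) (column_num : Int) (out : Int) : Prop := out = move_column_south_alt map column_num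
instance (map : List (List String)) (column_num : Int) (out : Int) : Decidable (Spec_move_column_south map column_num out) := by unfold Spec_move_column_south; infer_instance

-- ===== CLAIM (what is proved, stated in full; the proofs are below) =====
def Claim_equal_move_column_south : Prop := ∀ (map : List (List String)) (column_num : Int), Dom_move_column_south map column_num → Pre_move_column_south map column_num → Spec_move_column_south map column_num (move_column_south map column_num)

-- ===== LEMMAS AND PROOFS =====

-- The column as a list of symbols (top to bottom).
def pvCol (map : List (List String)) (column_num : Int) : List String :=
  map.map (fun r => PySem.List.pyGetD r column_num "")

-- Reference recursion for A's bottom-up pass over a column suffix: returns (d, load) where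
-- d = settled height measured from the bottom (= total_rows - last_occupied_row).
def pvFA : List String → Int × Int
  | [] => (0, 0)
  | s :: t =>
    let p := pvFA t
    if s = "O" then (p.1 + 1, p.2 + p.1 + 1)
    else if s = "." then p
    else (((t.length : Int) + 1), p.2)

-- Reference recursion for B's top-down pass (k = pending O count, load = accumulator).
def pvGB : List String → Int → Int → Int
  | [], k, load => load + PySem.Int.floordiv (k * (k + 1)) 2
  | s :: t, k, load =>
    if s = "O" then pvGB t (k + 1) load
    else if s = "." then pvGB t k load
    else pvGB t 0 (load + k * ((t.length : Int) + 1) + PySem.Int.floordiv (k * (k + 1)) 2)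

theorem pvT_succ (k : Int) :
    PySem.Int.floordiv ((k + 1) * (k + 2)) 2 = PySem.Int.floordiv (k * (k + 1)) 2 + (k + 1) := by
  rw [PySem.Int.floordiv_eq_ediv_of_pos (by norm_num), PySem.Int.floordiv_eq_ediv_of_pos (by norm_num)]
  have h : (k + 1) * (k + 2) = k * (k + 1) + (k + 1) * 2 := by ring
  rw [h, Int.add_mul_ediv_right _ _ (by norm_num)]

-- Main bridge: B's recursion expressed through A's.
theorem pvGB_eq_fA (l : List String) : ∀ k load : Int,
    pvGB l k load = load + (pvFA l).2 + k * (pvFA l).1 + PySem.Int.floordiv (k * (k + 1)) 2 := by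
  induction l with
  | nil => intro k load; simp [pvGB, pvFA]
  | cons s t ih =>
    intro k load
    by_cases hO : s = "O"
    · have h2 : (k + 1) * (k + 1 + 1) = (k + 1) * (k + 2) := by ring
      simp only [pvGB, pvFA, hO, if_true, ih (k + 1) load, h2, pvT_succ k]
      ring
    · by_cases hD : s = "."
      · simp [pvGB, pvFA, hD, ih k load]
      · have h00 : PySem.Int.floordiv ((0 : Int) * (0 + 1)) 2 = 0 := by decide
        simp only [pvGB, pvFA, hO, hD, if_false, ih 0 _, h00]
        ring

-- A's index list: range(total_rows-1, -1, -1) for total_rows = n.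
theorem pvRangeDown (n : Nat) :
    PySem.List.pyRange ((n : Int) - 1) (-1) (-1)
      = (List.range n).map (fun k : Nat => (n : Int) - 1 - (k : Int)) := by
  simp only [PySem.List.pyRange]
  rcases Nat.eq_zero_or_pos n with h | h
  · subst h; simp
  · rw [if_neg (by norm_num : ¬ (-1:Int) = 0)]
    rw [if_neg (by norm_num : ¬ (0:Int) < -1)]
    rw [if_pos (by omega : (-1:Int) < (n:Int) - 1)]
    have hcnt : (((n:Int) - 1 - -1 + -(-1) - 1) / -(-1)).toNat = n := by norm_num
    rw [hcnt]
    refine List.map_congr_left ?_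
    intro k _
    ring

-- A's foldl over the first m processed rows [n-1, …, n-m] (new_column carried existentially:
-- the last_occupied_row / load updates never read it).
theorem pvA_inv (map : List (List String)) (column_num : Int) (m : Nat) : m ≤ map.length →
    ∃ nc : List String,
      (((List.range m).map (fun k : Nat => (map.length : Int) - 1 - (k : Int))).foldl
        (fun (st : List String × Int × Int) row_num =>
          if PySem.List.pyGetD (PySem.List.pyGetD map row_num []) column_num "" = "." then st
          else if PySem.List.pyGetD (PySem.List.pyGetD map row_num []) column_num "" = "O" then
            (st.1 ++ ["O"], st.2.1 - 1, st.2.2 + ((map.length : Int) - (st.2.1 - 1)))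
          else
            ((st.1 ++ List.replicate (((map.length : Int) - row_num - 1).toNat - st.1.length) ".") ++ ["#"],
             row_num, st.2.2))
        ([], (map.length : Int), 0))
      = (nc, (map.length : Int) - (pvFA ((pvCol map column_num).drop (map.length - m))).1,
             (pvFA ((pvCol map column_num).drop (map.length - m))).2) := by
  have hclen : (pvCol map column_num).length = map.length := by simp [pvCol]
  induction m with
  | zero =>
    intro hm
    refine ⟨[], ?_⟩
    have hnil : (pvCol map column_num).drop (map.length - 0) = [] :=
      List.drop_eq_nil_of_le (by omega)
    rw [hnil]
    simp [pvFA]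
  | succ m ih =>
    intro hm
    obtain ⟨nc, hnc⟩ := ih (by omega)
    have hidx : map.length - (m + 1) < (pvCol map column_num).length := by omega
    have hdrop : (pvCol map column_num).drop (map.length - (m + 1))
        = (pvCol map column_num)[map.length - (m + 1)] :: (pvCol map column_num).drop (map.length - m) := by
      rw [List.drop_eq_getElem_cons hidx]
      have h1 : map.length - (m + 1) + 1 = map.length - m := by omega
      rw [h1]
    have hrow : ((map.length : Int) - 1 - (m : Int)) = ((map.length - (m + 1) : Nat) : Int) := by
      rw [Nat.cast_sub hm]
      push_cast
      ring_nf
    have hsym : PySem.List.pyGetD (PySem.List.pyGetD map ((map.length : Int) - 1 - (m : Int)) []) column_num ""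
        = (pvCol map column_num)[map.length - (m + 1)] := by
      rw [hrow]
      have h1 : PySem.List.pyGetD map ((map.length - (m + 1) : Nat) : Int) ([] : List String)
          = map[map.length - (m + 1)]'(by omega) := by
        rw [PySem.List.pyGetD_natCast]
        exact List.getD_eq_getElem _ _ _
      rw [h1]
      simp [pvCol]
    rw [List.range_succ, List.map_append, List.foldl_append, hnc]
    simp only [List.map_cons, List.map_nil, List.foldl_cons, List.foldl_nil, hsym]
    rw [hdrop]
    by_cases hD : (pvCol map column_num)[map.length - (m + 1)] = "."
    · refine ⟨nc, ?_⟩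
      simp [pvFA, hD]
    · by_cases hO : (pvCol map column_num)[map.length - (m + 1)] = "O"
      · refine ⟨nc ++ ["O"], ?_⟩
        have hfa : pvFA ((pvCol map column_num)[map.length - (m + 1)] :: (pvCol map column_num).drop (map.length - m))
            = ((pvFA ((pvCol map column_num).drop (map.length - m))).1 + 1,
               (pvFA ((pvCol map column_num).drop (map.length - m))).2
                 + (pvFA ((pvCol map column_num).drop (map.length - m))).1 + 1) := by
          simp [pvFA, hO]
        rw [if_neg hD, if_pos hO, hfa]
        simp only [Prod.mk.injEq]
        exact ⟨trivial, by ring, by ring⟩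
      · refine ⟨(nc ++ List.replicate (((map.length : Int) - ((map.length : Int) - 1 - (m : Int)) - 1).toNat - nc.length) ".") ++ ["#"], ?_⟩
        have hlen : (((pvCol map column_num).drop (map.length - m)).length : Int) = (m : Int) := by
          rw [List.length_drop, hclen]
          omega
        have hfa : pvFA ((pvCol map column_num)[map.length - (m + 1)] :: (pvCol map column_num).drop (map.length - m))
            = ((m : Int) + 1, (pvFA ((pvCol map column_num).drop (map.length - m))).2) := by
          simp only [pvFA]
          rw [if_neg hO, if_neg hD, hlen]
        rw [if_neg hD, if_neg hO, hfa]
        simp only [Prod.mk.injEq]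
        exact ⟨trivial, by ring, trivial⟩

-- B's foldl over rows j..n-1 equals pvGB on the corresponding column suffix.
theorem pvB_inv (map : List (List String)) (column_num : Int) (j : Nat) (hj : j ≤ map.length) :
    ∀ k load : Int,
      ((PySem.List.pyRange (j : Int) (map.length : Int) 1).foldl
        (fun (st : Int × Int) row =>
          if PySem.List.pyGetD (PySem.List.pyGetD map row []) column_num "" = "O" then (st.1, st.2 + 1)
          else if PySem.List.pyGetD (PySem.List.pyGetD map row []) column_num "" = "." then st
          else (st.1 + st.2 * ((map.length : Int) - row) + PySem.Int.floordiv (st.2 * (st.2 + 1)) 2, 0))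
        (load, k)).1
      + PySem.Int.floordiv
          (((PySem.List.pyRange (j : Int) (map.length : Int) 1).foldl
            (fun (st : Int × Int) row =>
              if PySem.List.pyGetD (PySem.List.pyGetD map row []) column_num "" = "O" then (st.1, st.2 + 1)
              else if PySem.List.pyGetD (PySem.List.pyGetD map row []) column_num "" = "." then st
              else (st.1 + st.2 * ((map.length : Int) - row) + PySem.Int.floordiv (st.2 * (st.2 + 1)) 2, 0))
            (load, k)).2
           * (((PySem.List.pyRange (j : Int) (map.length : Int) 1).foldl
            (fun (st : Int × Int) row =>
              if PySem.List.pyGetD (PySem.List.pyGetD map row []) column_num "" = "O" then (st.1, st.2 + 1)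
              else if PySem.List.pyGetD (PySem.List.pyGetD map row []) column_num "" = "." then st
              else (st.1 + st.2 * ((map.length : Int) - row) + PySem.Int.floordiv (st.2 * (st.2 + 1)) 2, 0))
            (load, k)).2 + 1)) 2
      = pvGB ((pvCol map column_num).drop j) k load := by
  have hclen : (pvCol map column_num).length = map.length := by simp [pvCol]
  induction hd : map.length - j generalizing j with
  | zero =>
    intro k load
    have hempty : PySem.List.pyRange (j : Int) (map.length : Int) 1 = [] := by
      rw [PySem.List.pyRange_one]
      have h0 : (((map.length : Int) - (j : Int)).toNat) = 0 := by omega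
      rw [h0]; simp
    have hnil : (pvCol map column_num).drop j = [] := List.drop_eq_nil_of_le (by omega)
    rw [hempty, hnil]
    simp [pvGB]
  | succ d ih =>
    intro k load
    have hcons : PySem.List.pyRange (j : Int) (map.length : Int) 1
        = (j : Int) :: PySem.List.pyRange ((j : Int) + 1) (map.length : Int) 1 :=
      PySem.List.pyRange_one_cons (by omega)
    have hidx : j < (pvCol map column_num).length := by omega
    have hdrop : (pvCol map column_num).drop j
        = (pvCol map column_num)[j] :: (pvCol map column_num).drop (j + 1) :=
      List.drop_eq_getElem_cons hidx
    have hsym : PySem.List.pyGetD (PySem.List.pyGetD map (j : Int) []) column_num ""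
        = (pvCol map column_num)[j] := by
      have h1 : PySem.List.pyGetD map ((j : Nat) : Int) ([] : List String) = map[j]'(by omega) := by
        rw [PySem.List.pyGetD_natCast]
        exact List.getD_eq_getElem _ _ _
      rw [h1]
      simp [pvCol]
    have hcast : ((j : Int) + 1) = ((j + 1 : Nat) : Int) := by push_cast; ring
    have ih' := ih (j + 1) (by omega) (by omega)
    rw [hcons]
    simp only [List.foldl_cons, hsym]
    rw [hdrop]
    by_cases hO : (pvCol map column_num)[j] = "O"
    · simp only [pvGB, hO, if_true]
      rw [hcast]
      exact ih' (k + 1) load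
    · by_cases hD : (pvCol map column_num)[j] = "."
      · simp only [pvGB, hD, if_true]
        rw [hcast]
        exact ih' k load
      · simp only [pvGB, hO, hD, if_false]
        have hlen : (((pvCol map column_num).drop (j + 1)).length : Int) + 1 = (map.length : Int) - (j : Int) := by
          rw [List.length_drop, hclen]
          omega
        rw [← hlen, hcast]
        exact ih' 0 _

-- ===== VERDICT (by name: the statement is the Claim_ definition above) =====
theorem move_column_south_spec : Claim_equal_move_column_south := by
  intro map column_num _ _
  unfold Spec_move_column_south
  simp only [move_column_south, move_column_south_alt]
  obtain ⟨nc, hA⟩ := pvA_inv map column_num map.length le_rfl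
  have hB := pvB_inv map column_num 0 (Nat.zero_le _) 0 0
  simp only [Nat.cast_zero] at hB
  rw [pvRangeDown map.length, hA, hB]
  simp only [Nat.sub_self, List.drop_zero]
  rw [pvGB_eq_fA]
  simp
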